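-- pv_equiv track=rewrite | github.com/itsmeshreyg05/Call-audit | scheduler.py | is_voicemail_call
-- ===== SOURCE A (Python) =====
-- def is_voicemail_call(full_transcript: str) -> bool:
--     """
--     Detects whether a transcript contains indications of voicemail, IVR,
--     virtual assistant, or other automated system messages.
--
--     Returns True if any known indicators are found in the transcript.
--     """
--     if not full_transcript or not full_transcript.strip():
--         return False
--
--
--     transcript_lower = full_transcript.lower()
--
--     voicemail_indicators = [
--
--         "forwarded to voicemail",
--         "person you're trying to reach is not available",
--         "please leave your name number in a short message",
--         "the person you are trying to reach is not available",
--         "at the tone, please record your message",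
--         "when you have finished recording",
--         "leave a message after the beep",
--         "could you transfer this call",
--         "please leave your message",
--         "mailbox is full",
--         "subscriber is not available",
--         "your call has been forwarded to",
--         "virtual calling assistant recording this call",
--         "please keep holding. to connect your call",
--
--
--         "google voice subscriber",
--         "google virtual assistant",
--         "google voice will try to connect you",
--         "you've reached the google voice mailbox",
--         "please enter verification code",
--         "please press",
--
--
--         "press 1 for",
--         "press any key to continue",
--         "to speak with a representative",
--         "please hold while we connect your call",
--         "please select from the following options",
--
--
--         "call is being forwarded",
--         "your call is being connected",
--         "transferring your call",
--
--
--         "thank you for calling",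
--         "you have reached the office of",
--         "our office is currently closed",
--         "business hours are",
--         "to leave a message"
--     ]
--
--
--     for phrase in voicemail_indicators:
--         if phrase in transcript_lower:
--             return True
--
--     return False
-- ===== SOURCE B (Python) =====
-- _PHRASES = [
--     "forwarded to voicemail",
--     "person you're trying to reach is not available",
--     "please leave your name number in a short message",
--     "the person you are trying to reach is not available",
--     "at the tone, please record your message",
--     "when you have finished recording",
--     "leave a message after the beep",
--     "could you transfer this call",
--     "please leave your message",
--     "mailbox is full",
--     "subscriber is not available",
--     "your call has been forwarded to",
--     "virtual calling assistant recording this call",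
--     "please keep holding. to connect your call",
--     "google voice subscriber",
--     "google virtual assistant",
--     "google voice will try to connect you",
--     "you've reached the google voice mailbox",
--     "please enter verification code",
--     "please press",
--     "press 1 for",
--     "press any key to continue",
--     "to speak with a representative",
--     "please hold while we connect your call",
--     "please select from the following options",
--     "call is being forwarded",
--     "your call is being connected",
--     "transferring your call",
--     "thank you for calling",
--     "you have reached the office of",
--     "our office is currently closed",
--     "business hours are",
--     "to leave a message",
-- ]
--
-- # Index the phrases by their first character once at load time, so the
-- # transcript is walked left to right in one positional scan: at each position
-- # only the phrases starting with that character are tried with startswith.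
-- _BY_FIRST = {}
-- for _p in _PHRASES:
--     _BY_FIRST.setdefault(_p[0], []).append(_p)
--
--
-- def _try_phrases(cands, t, i):
--     for p in cands:
--         if t.startswith(p, i):
--             return True
--     return False
--
--
-- def is_voicemail_call(full_transcript: str) -> bool:
--     if not full_transcript.strip():
--         return False
--     t = full_transcript.lower()
--     i = 0
--     while i < len(t):
--         if _try_phrases(_BY_FIRST.get(t[i], ()), t, i):
--             return True
--         i += 1
--     return False
-- ===== Notes on version B (the rewrite author's own statement) =====
-- stated objective: alternative
-- what changed: Instead of scanning the whole transcript once per phrase with the substring operator, B builds a first-character index of the phrases once at module load and walks the lowered transcript in a single left-to-right positional scan, trying startswith only for the phrases that begin with the character at the current position.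
import Mathlib
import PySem

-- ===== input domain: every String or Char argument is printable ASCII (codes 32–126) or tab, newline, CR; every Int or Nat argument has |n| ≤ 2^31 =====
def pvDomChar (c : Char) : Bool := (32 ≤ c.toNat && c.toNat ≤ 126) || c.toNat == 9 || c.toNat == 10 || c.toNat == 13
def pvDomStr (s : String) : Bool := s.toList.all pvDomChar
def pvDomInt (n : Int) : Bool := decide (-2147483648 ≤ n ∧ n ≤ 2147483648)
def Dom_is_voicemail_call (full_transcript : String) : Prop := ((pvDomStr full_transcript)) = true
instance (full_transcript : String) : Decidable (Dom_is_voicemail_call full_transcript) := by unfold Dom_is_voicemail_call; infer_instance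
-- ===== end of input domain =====

-- B replaces A's per-phrase substring scans with a single left-to-right positional
-- scan of the transcript guided by a first-character index of the phrases
-- (objective: alternative).

-- ===== PORT A =====
def pvPhrasesA : List String := [
  "forwarded to voicemail",
  "person you're trying to reach is not available",
  "please leave your name number in a short message",
  "the person you are trying to reach is not available",
  "at the tone, please record your message",
  "when you have finished recording",
  "leave a message after the beep",
  "could you transfer this call",
  "please leave your message",
  "mailbox is full",
  "subscriber is not available",
  "your call has been forwarded to",
  "virtual calling assistant recording this call",
  "please keep holding. to connect your call",
  "google voice subscriber",
  "google virtual assistant",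
  "google voice will try to connect you",
  "you've reached the google voice mailbox",
  "please enter verification code",
  "please press",
  "press 1 for",
  "press any key to continue",
  "to speak with a representative",
  "please hold while we connect your call",
  "please select from the following options",
  "call is being forwarded",
  "your call is being connected",
  "transferring your call",
  "thank you for calling",
  "you have reached the office of",
  "our office is currently closed",
  "business hours are",
  "to leave a message"]

def is_voicemail_call (full_transcript : String) : Bool :=
  -- 'if not full_transcript or not full_transcript.strip(): return False'
  if full_transcript == "" || PySem.Str.strip full_transcript == "" then false
  else
    let transcript_lower := PySem.Str.lower full_transcript
    -- 'for phrase in voicemail_indicators: if phrase in transcript_lower: return True / return False'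
    pvPhrasesA.any (fun phrase => PySem.Str.isIn phrase transcript_lower)

-- ===== PORT B =====
def pvPhrasesB : List String := [
  "forwarded to voicemail",
  "person you're trying to reach is not available",
  "please leave your name number in a short message",
  "the person you are trying to reach is not available",
  "at the tone, please record your message",
  "when you have finished recording",
  "leave a message after the beep",
  "could you transfer this call",
  "please leave your message",
  "mailbox is full",
  "subscriber is not available",
  "your call has been forwarded to",
  "virtual calling assistant recording this call",
  "please keep holding. to connect your call",
  "google voice subscriber",
  "google virtual assistant",
  "google voice will try to connect you",
  "you've reached the google voice mailbox",
  "please enter verification code",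
  "please press",
  "press 1 for",
  "press any key to continue",
  "to speak with a representative",
  "please hold while we connect your call",
  "please select from the following options",
  "call is being forwarded",
  "your call is being connected",
  "transferring your call",
  "thank you for calling",
  "you have reached the office of",
  "our office is currently closed",
  "business hours are",
  "to leave a message"]

-- '_BY_FIRST.setdefault(_p[0], []).append(_p)'; every phrase is nonempty,
-- so '_p[0]' is exactly 'toList.headD ' ''.
def pvByFirst : PySem.Dict Char (List (List Char)) :=
  pvPhrasesB.foldl
    (fun d p => d.modify (p.toList.headD ' ') [] (· ++ [p.toList]))
    PySem.Dict.empty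

-- '_try_phrases(cands, t, i): for p in cands: if t.startswith(p, i): return True;
-- return False' — 't.startswith(p, i)' is exactly 'startswith (t.drop i) p'
def pvTryPhrases (cands : List (List Char)) (t : List Char) (i : Nat) : Bool :=
  match cands with
  | [] => false
  | p :: ps =>
    if PySem.Chars.startswith (t.drop i) p then true else pvTryPhrases ps t i

-- 'i = 0; while i < len(t): if _try_phrases(...): return True; i += 1; return False'
-- — 't[i]' for 0 ≤ i < len(t) is 't.getD i _'
def pvWhileScan (t : List Char) (i : Nat) : Bool :=
  if i < t.length then
    if pvTryPhrases (pvByFirst.getD (t.getD i ' ') []) t i then true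
    else pvWhileScan t (i + 1)
  else false
termination_by t.length - i

def is_voicemail_call_alt (full_transcript : String) : Bool :=
  if PySem.Str.strip full_transcript == "" then false
  else pvWhileScan (PySem.Str.lower full_transcript).toList 0

-- ===== PRECONDITION & SPEC =====
def Spec_is_voicemail_call (full_transcript : String) (out : Bool) : Prop := out = is_voicemail_call_alt full_transcript
instance (full_transcript : String) (out : Bool) : Decidable (Spec_is_voicemail_call full_transcript out) := by unfold Spec_is_voicemail_call; infer_instance

-- ===== CLAIM (what is proved, stated in full; the proofs are below) =====
def Claim_equal_is_voicemail_call : Prop := ∀ (full_transcript : String), Dom_is_voicemail_call full_transcript → Spec_is_voicemail_call full_transcript (is_voicemail_call full_transcript)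

-- ===== LEMMAS AND PROOFS =====

-- the inner for-loop is an any over the candidate list
lemma pvTryPhrases_eq_any (cands : List (List Char)) (t : List Char) (i : Nat) :
    pvTryPhrases cands t i
      = cands.any (fun p => PySem.Chars.startswith (t.drop i) p) := by
  induction cands with
  | nil => rfl
  | cons p ps ih =>
    rw [pvTryPhrases, List.any_cons]
    by_cases h : PySem.Chars.startswith (t.drop i) p = true <;> simp [h, ih]

-- the while loop succeeds iff some position at or after i fires
lemma pvWhileScan_eq_true_iff (t : List Char) :
    ∀ (i : Nat), pvWhileScan t i = true ↔
      ∃ j, i ≤ j ∧ j < t.length ∧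
        (pvByFirst.getD (t.getD j ' ') []).any
          (fun p => PySem.Chars.startswith (t.drop j) p) = true := by
  intro i
  induction hn : t.length - i using Nat.strong_induction_on generalizing i with
  | _ n ih =>
    rw [pvWhileScan]
    by_cases hi : i < t.length
    · rw [if_pos hi, pvTryPhrases_eq_any]
      by_cases hhit :
          (pvByFirst.getD (t.getD i ' ') []).any
            (fun p => PySem.Chars.startswith (t.drop i) p) = true
      · rw [if_pos hhit]
        exact iff_of_true rfl ⟨i, le_refl i, hi, hhit⟩
      · rw [if_neg hhit]
        rw [ih (t.length - (i + 1)) (by omega) (i + 1) rfl]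
        constructor
        · rintro ⟨j, hj1, hj2, hj3⟩; exact ⟨j, by omega, hj2, hj3⟩
        · rintro ⟨j, hj1, hj2, hj3⟩
          refine ⟨j, ?_, hj2, hj3⟩
          rcases Nat.eq_or_lt_of_le hj1 with h | h
          · exact absurd (h ▸ hj3) hhit
          · omega
    · rw [if_neg hi]
      refine iff_of_false (by simp) ?_
      rintro ⟨j, hj1, hj2, -⟩; omega

-- the first-character index holds, under each character, exactly the phrases
-- starting with it, in order
lemma pvByFirst_getD (c : Char) :
    pvByFirst.getD c [] =
      (pvPhrasesB.map String.toList).filter (fun p => p.headD ' ' == c) := by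
  have h : pvByFirst =
      (pvPhrasesB.map (fun p => (p.toList.headD ' ', p.toList))).foldl
        (fun d q => d.modify q.1 [] (· ++ [q.2])) PySem.Dict.empty := by
    rw [List.foldl_map]; rfl
  rw [h, PySem.Dict.getD_foldl_modify_append, PySem.Dict.getD_empty, List.nil_append,
    List.filter_map, List.map_map]
  simp [Function.comp_def, List.filter_map]

lemma pvPhrases_ne_nil : ∀ p ∈ pvPhrasesB.map String.toList, p ≠ [] := by decide

-- the positional scan finds a phrase iff some phrase is a substring
lemma scan_eq_any_isIn (t : List Char) :
    pvWhileScan t 0 = pvPhrasesB.any (fun s => PySem.Chars.isIn s.toList t) := by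
  rw [Bool.eq_iff_iff, pvWhileScan_eq_true_iff]
  simp only [List.any_eq_true, pvByFirst_getD, List.mem_filter,
    PySem.Chars.startswith_iff, beq_iff_eq, List.mem_map]
  constructor
  · rintro ⟨i, -, hi, p, ⟨⟨s, hs, rfl⟩, -⟩, hpre⟩
    exact ⟨s, hs, (PySem.Chars.exists_prefix_drop_iff_isIn _ _).mp ⟨i, hpre⟩⟩
  · rintro ⟨s, hs, hin⟩
    obtain ⟨j, hpre⟩ := (PySem.Chars.exists_prefix_drop_iff_isIn _ _).mpr hin
    have hne : s.toList ≠ [] := pvPhrases_ne_nil _ (List.mem_map.mpr ⟨s, hs, rfl⟩)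
    have hj : j < t.length := by
      by_contra h
      rw [List.drop_eq_nil_of_le (Nat.le_of_not_lt h)] at hpre
      exact hne (List.prefix_nil.mp hpre)
    refine ⟨j, Nat.zero_le j, hj, s.toList, ⟨⟨s, hs, rfl⟩, ?_⟩, hpre⟩
    obtain ⟨c, cs, hcons⟩ := List.exists_cons_of_ne_nil hne
    have hdrop : List.drop j t = t[j] :: List.drop (j+1) t := List.drop_eq_getElem_cons hj
    obtain ⟨u, hu⟩ := hpre
    rw [hcons, hdrop] at hu
    have : c = t[j] := by injection hu
    simp [hcons, this, List.getElem?_eq_getElem hj]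

-- ===== VERDICT (by name: the statement is the Claim_ definition above) =====
theorem is_voicemail_call_spec : Claim_equal_is_voicemail_call := by
  intro full_transcript _
  unfold Spec_is_voicemail_call is_voicemail_call is_voicemail_call_alt
  by_cases hs : PySem.Str.strip full_transcript = ""
  · simp [hs]
  · have hne : full_transcript ≠ "" := by
      intro h; subst h; exact hs (by decide)
    rw [if_neg (by simp [hne, hs]), if_neg (by simp [hs])]
    rw [scan_eq_any_isIn]
    simp only [PySem.Str.isIn_eq]
    rfl
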